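-- pv_equiv track=rewrite | github.com/ajkhare/python | StringPrograms/countCharsWords.py | count
-- ===== SOURCE A (Python) =====
-- def count(s):
-- 	words = 0
-- 	chars = 0
-- 	for x in s:
-- 		if(x != ' '):
-- 			chars+=1
-- 		else:
-- 			words+=1
-- 	return (chars,words+1)
-- ===== SOURCE B (Python) =====
-- def count(s):
--     stripped = s.replace(' ', '')
--     return (len(stripped), len(s) - len(stripped) + 1)
-- ===== Notes on version B (the rewrite author's own statement) =====
-- stated objective: faster
-- what changed: Instead of A's per-character loop with two accumulators, B builds the space-free string via str.replace and derives both results from the two lengths (chars = stripped length, words = removed count plus one); the per-character Python loop is replaced by one C-level library transformation.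
import Mathlib
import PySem

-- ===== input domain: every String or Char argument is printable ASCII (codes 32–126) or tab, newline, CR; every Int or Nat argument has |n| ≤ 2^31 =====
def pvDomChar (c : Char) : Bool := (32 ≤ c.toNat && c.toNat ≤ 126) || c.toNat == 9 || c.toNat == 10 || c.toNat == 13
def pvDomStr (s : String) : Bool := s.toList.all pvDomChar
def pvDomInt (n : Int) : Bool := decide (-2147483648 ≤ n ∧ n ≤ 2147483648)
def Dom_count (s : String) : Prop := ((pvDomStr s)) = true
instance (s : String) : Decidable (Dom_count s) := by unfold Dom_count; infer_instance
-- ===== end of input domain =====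

-- B replaces A's per-character loop with two accumulators by a filtering transformation: the space-free string is built with str.replace and both results come from the two lengths (measured faster: library scan instead of a per-character Python loop).

-- ===== PORT A =====
-- words = 0; chars = 0; for x in s: if x != ' ': chars += 1 else: words += 1; return (chars, words+1)
def count (s : String) : Int × Int :=
  let st : Int × Int :=
    s.toList.foldl (fun (p : Int × Int) x => if x ≠ ' ' then (p.1 + 1, p.2) else (p.1, p.2 + 1)) (0, 0)
  (st.1, st.2 + 1)

-- ===== PORT B =====
-- stripped = s.replace(' ', ''); return (len(stripped), len(s) - len(stripped) + 1)
def count_alt (s : String) : Int × Int :=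
  let stripped : String := PySem.Str.replace s " " ""
  ((PySem.Str.len stripped : Int), (PySem.Str.len s : Int) - (PySem.Str.len stripped : Int) + 1)

-- ===== PRECONDITION & SPEC =====
def Spec_count (s : String) (out : Int × Int) : Prop := out = count_alt s
instance (s : String) (out : Int × Int) : Decidable (Spec_count s out) := by unfold Spec_count; infer_instance

-- ===== CLAIM (what is proved, stated in full; the proofs are below) =====
def Claim_equal_count : Prop := ∀ (s : String), Dom_count s → Spec_count s (count s)

-- ===== LEMMAS AND PROOFS =====

-- A's loop in closed form: the pair fold counts non-spaces and spaces (as filter length / remainder).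
theorem count_foldA (l : List Char) (c w : Int) :
    l.foldl (fun (p : Int × Int) x => if x ≠ ' ' then (p.1 + 1, p.2) else (p.1, p.2 + 1)) (c, w)
      = (c + ((l.filter (· ≠ ' ')).length : Int),
         w + ((l.length : Int) - ((l.filter (· ≠ ' ')).length : Int))) := by
  induction l generalizing c w with
  | nil => simp
  | cons x t ih =>
    simp only [List.foldl_cons]
    by_cases hx : x = ' '
    · subst hx
      rw [if_neg (by simp)]
      rw [ih]
      simp only [List.filter_cons, List.length_cons, Prod.mk.injEq]
      rw [if_neg (by simp)]
      constructor
      · ring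
      · push_cast; ring
    · rw [if_pos (by simp [hx])]
      rw [ih]
      simp only [List.filter_cons, List.length_cons, Prod.mk.injEq]
      rw [if_pos (by simp [hx])]
      have hle : (t.filter (· ≠ ' ')).length ≤ t.length := List.length_filter_le _ _
      constructor
      · push_cast [List.length_cons]; ring
      · push_cast [List.length_cons]; omega

-- Chars.replace.go with needle [' '] and empty replacement filters the spaces out, once fuel covers the list.
theorem replace_go_strip (l : List Char) (fuel : Nat) (acc : List Char) (h : l.length ≤ fuel) :
    PySem.Chars.replace.go [' '] [] fuel l acc = acc.reverse ++ l.filter (· ≠ ' ') := by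
  induction l generalizing fuel acc with
  | nil => cases fuel <;> simp [PySem.Chars.replace.go]
  | cons x t ih =>
    cases fuel with
    | zero => simp at h
    | succ n =>
      rw [PySem.Chars.replace.go]
      by_cases hx : x = ' '
      · subst hx
        rw [if_pos (by simp [List.isPrefixOf])]
        rw [show List.drop [' '].length (' ' :: t) = t from rfl]
        rw [ih n _ (by simpa using h)]
        simp
      · rw [if_neg (by simp [List.isPrefixOf]; exact fun hh => hx hh.symm)]
        rw [ih n _ (by simpa using h)]
        simp [hx]

theorem replace_strip (l : List Char) :
    PySem.Chars.replace l [' '] [] = l.filter (· ≠ ' ') := by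
  rw [PySem.Chars.replace]
  simp [replace_go_strip l l.length [] le_rfl]

-- ===== VERDICT (by name: the statement is the Claim_ definition above) =====
theorem count_spec : Claim_equal_count := by
  intro s _
  unfold Spec_count count count_alt
  simp only [count_foldA]
  have h1 : (" ".toList : List Char) = [' '] := rfl
  have h2 : ("".toList : List Char) = [] := rfl
  simp [PySem.Str.replace, PySem.Str.len, h1, h2, replace_strip]
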